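-- pv_equiv track=rewrite | github.com/leahuriarte/giga-osint | src/index/raptor/utils.py | top_by_len
-- ===== SOURCE A (Python) =====
-- from typing import List, Tuple
--
-- def top_by_len(texts: List[str], max_chars: int = 2800) -> str:
--     # pick sentences/chunks until cap
--     out, total = [], 0
--     for t in texts:
--         if not t: continue
--         L = len(t)
--         if total + L + 1 > max_chars: break
--         out.append(t); total += L + 1
--     return "\n".join(out)
-- ===== SOURCE B (Python) =====
-- def top_by_len(texts, max_chars=2800):
--     # Filter, build a prefix-sum table of costs (len+1), then BINARY SEARCH the
--     # largest prefix whose total cost fits the budget.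
--     nonempty = [t for t in texts if t]
--     prefix = [0]
--     for t in nonempty:
--         prefix.append(prefix[-1] + len(t) + 1)
--     lo, hi = 0, len(nonempty)
--     while lo < hi:
--         mid = (lo + hi + 1) // 2
--         if prefix[mid] <= max_chars:
--             lo = mid
--         else:
--             hi = mid - 1
--     return "\n".join(nonempty[:lo])
-- ===== Notes on version B (the rewrite author's own statement) =====
-- stated objective: alternative
-- what changed: Replaces the running-total loop with break by filtering, building a prefix-sum table of costs, and a hand-written binary search for the largest prefix that fits the cap, then one slice-and-join.
import Mathlib
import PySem

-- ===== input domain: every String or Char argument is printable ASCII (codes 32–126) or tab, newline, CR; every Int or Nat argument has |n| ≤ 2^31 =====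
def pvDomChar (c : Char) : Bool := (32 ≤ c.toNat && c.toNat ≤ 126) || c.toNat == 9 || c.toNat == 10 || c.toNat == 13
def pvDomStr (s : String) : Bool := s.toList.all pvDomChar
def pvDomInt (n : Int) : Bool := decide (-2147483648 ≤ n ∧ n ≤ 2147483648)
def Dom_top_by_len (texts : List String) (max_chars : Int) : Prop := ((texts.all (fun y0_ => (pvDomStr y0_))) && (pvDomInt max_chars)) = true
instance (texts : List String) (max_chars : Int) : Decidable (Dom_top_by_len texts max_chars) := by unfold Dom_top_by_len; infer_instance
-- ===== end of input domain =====

-- B replaces A's running-total loop-with-break by filter + prefix-sum table + binary search for the largest fitting prefix (alternative decomposition, same overall cost).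

-- ===== PORT A =====
-- the for-loop with `break`: recursion over texts carrying (out reversed, total)
def top_by_len_go (max_chars : Int) : List String → List String → Int → List String
  | [], out, _ => out.reverse
  | t :: ts, out, total =>
    if t = "" then top_by_len_go max_chars ts out total
    else
      if total + PySem.Str.len t + 1 > max_chars then out.reverse
      else top_by_len_go max_chars ts (t :: out) (total + PySem.Str.len t + 1)

def top_by_len (texts : List String) (max_chars : Int) : String :=
  PySem.Str.join "\n" (top_by_len_go max_chars texts [] 0)

-- ===== PORT B =====
-- the prefix-building loop: appends prefix[-1] + len(t) + 1, carrying the last value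
def top_by_len_prefix : List String → Int → List Int
  | [], _ => []
  | t :: ts, s => (s + PySem.Str.len t + 1) :: top_by_len_prefix ts (s + PySem.Str.len t + 1)

-- the while-loop binary search: largest lo with prefix[lo] <= max_chars
def top_by_len_bs (full : List Int) (max_chars : Int) (lo hi : Nat) : Nat :=
  if lo < hi then
    if full.getD ((lo + hi + 1) / 2) 0 ≤ max_chars then
      top_by_len_bs full max_chars ((lo + hi + 1) / 2) hi
    else
      top_by_len_bs full max_chars lo ((lo + hi + 1) / 2 - 1)
  else lo
termination_by hi - lo
decreasing_by all_goals omega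

def top_by_len_alt (texts : List String) (max_chars : Int) : String :=
  let nonempty := texts.filter (fun t => !(t == ""))
  let pre := (0 : Int) :: top_by_len_prefix nonempty 0
  let keep := top_by_len_bs pre max_chars 0 nonempty.length
  PySem.Str.join "\n" (nonempty.take keep)

-- ===== PRECONDITION & SPEC =====
def Spec_top_by_len (texts : List String) (max_chars : Int) (out : String) : Prop := out = top_by_len_alt texts max_chars
instance (texts : List String) (max_chars : Int) (out : String) : Decidable (Spec_top_by_len texts max_chars out) := by unfold Spec_top_by_len; infer_instance

-- ===== CLAIM (what is proved, stated in full; the proofs are below) =====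
def Claim_equal_top_by_len : Prop := ∀ (texts : List String) (max_chars : Int), Dom_top_by_len texts max_chars → Spec_top_by_len texts max_chars (top_by_len texts max_chars)

-- ===== LEMMAS AND PROOFS =====

-- the common denominator: pick elements while the running total stays within the cap
def pvPick (max_chars : Int) : List String → Int → List String
  | [], _ => []
  | t :: ts, total =>
    if total + PySem.Str.len t + 1 > max_chars then []
    else t :: pvPick max_chars ts (total + PySem.Str.len t + 1)

theorem pvGo_eq_pick (max_chars : Int) (ts : List String) :
    ∀ (out : List String) (total : Int),
      top_by_len_go max_chars ts out total =
        out.reverse ++ pvPick max_chars (ts.filter (fun t => !(t == ""))) total := by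
  induction ts with
  | nil => intro out total; simp [top_by_len_go, pvPick]
  | cons t ts ih =>
    intro out total
    by_cases ht : t = ""
    · simp [top_by_len_go, ht, ih]
    · rw [List.filter_cons_of_pos (by simp [ht])]
      simp only [top_by_len_go, if_neg ht, pvPick]
      by_cases hc : total + PySem.Str.len t + 1 > max_chars
      · rw [if_pos hc, if_pos hc]; simp
      · rw [if_neg hc, if_neg hc, ih]; simp

theorem pvStrLen_nonneg (t : String) : 0 ≤ PySem.Str.len t := by
  simp [PySem.Str.len_eq]

theorem pvPrefix_length (ts : List String) : ∀ s, (top_by_len_prefix ts s).length = ts.length := by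
  induction ts with
  | nil => intro s; simp [top_by_len_prefix]
  | cons t ts ih => intro s; simp [top_by_len_prefix, ih]

theorem pvPrefix_ge (ts : List String) :
    ∀ (s : Int) (k : Nat), k < ts.length → s + 1 ≤ (top_by_len_prefix ts s).getD k 0 := by
  induction ts with
  | nil => intro s k h; simp at h
  | cons t ts ih =>
    intro s k h
    cases k with
    | zero =>
      have := pvStrLen_nonneg t
      simp only [top_by_len_prefix, List.getD_cons_zero]
      omega
    | succ k =>
      have := ih (s + PySem.Str.len t + 1) k (by simpa using Nat.lt_of_succ_lt_succ h)
      have := pvStrLen_nonneg t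
      simp only [top_by_len_prefix, List.getD_cons_succ]
      omega

-- within range, the k-th prefix sum fits the cap iff k+1 ≤ the takeWhile count
theorem pvPrefixIff (M : Int) (ts : List String) :
    ∀ (s : Int) (k : Nat), k < ts.length →
      ((top_by_len_prefix ts s).getD k 0 ≤ M ↔
        k + 1 ≤ ((top_by_len_prefix ts s).takeWhile (fun a => decide (a ≤ M))).length) := by
  induction ts with
  | nil => intro s k h; simp at h
  | cons t ts ih =>
    intro s k h
    by_cases hc : s + PySem.Str.len t + 1 ≤ M
    · have hd : (decide (s + PySem.Str.len t + 1 ≤ M)) = true := decide_eq_true hc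
      cases k with
      | zero =>
        simp only [top_by_len_prefix, List.getD_cons_zero, List.takeWhile_cons, hd, if_true,
          List.length_cons]
        exact iff_of_true hc (by omega)
      | succ k =>
        have hk : k < ts.length := by simpa using Nat.lt_of_succ_lt_succ h
        have hih := ih (s + PySem.Str.len t + 1) k hk
        simp only [top_by_len_prefix, List.getD_cons_succ, List.takeWhile_cons, hd, if_true,
          List.length_cons]
        rw [hih]
        omega
    · have hd : (decide (s + PySem.Str.len t + 1 ≤ M)) = false := decide_eq_false hc
      cases k with
      | zero =>
        simp only [top_by_len_prefix, List.getD_cons_zero, List.takeWhile_cons, hd,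
          Bool.false_eq_true, if_false, List.length_nil]
        exact iff_of_false hc (by omega)
      | succ k =>
        have hk : k < ts.length := by simpa using Nat.lt_of_succ_lt_succ h
        have hge := pvPrefix_ge ts (s + PySem.Str.len t + 1) k hk
        simp only [top_by_len_prefix, List.getD_cons_succ, List.takeWhile_cons, hd,
          Bool.false_eq_true, if_false, List.length_nil]
        exact iff_of_false (by omega) (by omega)

-- binary search returns tw whenever lo ≤ tw ≤ hi ≤ n and the iff characterisation holds
theorem pvBs_correct (full : List Int) (M : Int) (tw n : Nat)
    (hiff : ∀ k, 1 ≤ k → k ≤ n → (full.getD k 0 ≤ M ↔ k ≤ tw)) :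
    ∀ (d lo hi : Nat), hi - lo ≤ d → lo ≤ tw → tw ≤ hi → hi ≤ n →
      top_by_len_bs full M lo hi = tw := by
  intro d
  induction d with
  | zero =>
    intro lo hi hd hlo hhi hn
    rw [top_by_len_bs]
    rw [if_neg (by omega)]
    omega
  | succ d ih =>
    intro lo hi hd hlo hhi hn
    rw [top_by_len_bs]
    by_cases hlt : lo < hi
    · rw [if_pos hlt]
      have hmid1 : lo < (lo + hi + 1) / 2 := by omega
      have hmid2 : (lo + hi + 1) / 2 ≤ hi := by omega
      by_cases hc : full.getD ((lo + hi + 1) / 2) 0 ≤ M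
      · rw [if_pos hc]
        have : (lo + hi + 1) / 2 ≤ tw := (hiff _ (by omega) (by omega)).1 hc
        exact ih _ hi (by omega) this hhi hn
      · rw [if_neg hc]
        have : ¬ ((lo + hi + 1) / 2 ≤ tw) := fun h => hc ((hiff _ (by omega) (by omega)).2 h)
        exact ih lo _ (by omega) hlo (by omega) (by omega)
    · rw [if_neg hlt]; omega

-- take (takeWhile count) of the prefix sums = A's greedy pick
theorem pvTake_tw_eq_pick (max_chars : Int) (ts : List String) :
    ∀ (total : Int),
      ts.take ((top_by_len_prefix ts total).takeWhile
          (fun s => decide (s ≤ max_chars))).length = pvPick max_chars ts total := by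
  induction ts with
  | nil => intro total; simp [top_by_len_prefix, pvPick]
  | cons t ts ih =>
    intro total
    simp only [top_by_len_prefix, List.takeWhile_cons, pvPick]
    by_cases hc : total + PySem.Str.len t + 1 > max_chars
    · rw [if_pos hc]
      have hd : (decide (total + PySem.Str.len t + 1 ≤ max_chars)) = false :=
        decide_eq_false (by omega)
      simp only [hd, Bool.false_eq_true, if_false, List.length_nil, List.take_zero]
    · rw [if_neg hc]
      have hd : (decide (total + PySem.Str.len t + 1 ≤ max_chars)) = true :=
        decide_eq_true (by omega)
      simp only [hd, if_true, List.length_cons, List.take_succ_cons, ih]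

-- ===== VERDICT (by name: the statement is the Claim_ definition above) =====
theorem top_by_len_spec : Claim_equal_top_by_len := by
  intro texts max_chars _
  unfold Spec_top_by_len top_by_len top_by_len_alt
  rw [pvGo_eq_pick]
  set ne := texts.filter (fun t => !(t == "")) with hne
  set tw := ((top_by_len_prefix ne 0).takeWhile (fun a => decide (a ≤ max_chars))).length with htw
  have htwn : tw ≤ ne.length := by
    rw [htw, ← pvPrefix_length ne 0]
    exact (List.takeWhile_prefix _).length_le
  have hbs : top_by_len_bs ((0 : Int) :: top_by_len_prefix ne 0) max_chars 0 ne.length = tw := by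
    apply pvBs_correct _ max_chars tw ne.length ?_ ne.length 0 ne.length (by omega) (by omega) htwn (le_refl _)
    intro k hk1 hkn
    cases k with
    | zero => omega
    | succ k =>
      have hk : k < ne.length := by omega
      have := pvPrefixIff max_chars ne 0 k hk
      simp only [List.getD_cons_succ]
      rw [this]
  show PySem.Str.join "\n" ([].reverse ++ pvPick max_chars ne 0) =
    PySem.Str.join "\n"
      (List.take (top_by_len_bs ((0 : Int) :: top_by_len_prefix ne 0) max_chars 0 ne.length) ne)
  rw [hbs, htw, ← pvTake_tw_eq_pick max_chars ne 0]
  simp
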